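-- pv_equiv track=rewrite | github.com/Hassan-Farid/DAA-Assignments | Anagram Detection/ComparisonAnagram.py | CompAnagram
-- ===== SOURCE A (Python) =====
-- def CompAnagram(str1, str2):
--     '''
--         Selects and compares every character in the first string
--         with every other character in the second string. If all
--         characters match, it gives True as result otherwise False.
--     '''
--
--     isAnagram = False
--     matchCount = 0 #Counter variable to count how many total matches have been made per nested loop
--
--     for i in str1:
--         for j in str2:
--             if i == j:
--                 matchCount += 1
--                 break
--     if matchCount == len(str1):
--         isAnagram = True
--
--     return isAnagram
-- ===== SOURCE B (Python) =====
-- def CompAnagram(str1, str2):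
--     return set(str1) <= set(str2)
-- ===== Notes on version B (the rewrite author's own statement) =====
-- stated objective: idiomatic
-- what changed: Replaced the nested count-and-break scan plus matchCount-vs-len check with a single set-subset comparison over the deduplicated character sets.
import Mathlib
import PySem

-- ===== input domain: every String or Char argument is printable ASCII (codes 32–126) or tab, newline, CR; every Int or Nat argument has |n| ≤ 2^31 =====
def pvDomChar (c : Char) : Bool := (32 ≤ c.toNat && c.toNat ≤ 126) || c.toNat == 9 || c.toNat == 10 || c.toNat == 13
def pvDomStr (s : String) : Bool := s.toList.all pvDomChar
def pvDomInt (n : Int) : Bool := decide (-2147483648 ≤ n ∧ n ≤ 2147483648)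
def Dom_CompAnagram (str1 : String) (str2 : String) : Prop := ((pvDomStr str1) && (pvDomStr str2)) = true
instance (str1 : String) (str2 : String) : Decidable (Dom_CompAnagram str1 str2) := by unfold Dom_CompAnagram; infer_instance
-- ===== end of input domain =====

-- ===== PORT A =====
-- B changes: one set-subset test instead of the nested count-and-break scan (idiomatic rewrite).
-- inner loop: 'for j in str2: if i == j: matchCount += 1; break'
def CompAnagramInner (i : Char) (js : List Char) : Int :=
  match js with
  | [] => 0
  | j :: rest => if i == j then 1 else CompAnagramInner i rest

-- outer loop over str1, threading matchCount
def CompAnagramLoop (cs : List Char) (js : List Char) (matchCount : Int) : Int :=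
  match cs with
  | [] => matchCount
  | c :: rest => CompAnagramLoop rest js (matchCount + CompAnagramInner c js)

def CompAnagram (str1 : String) (str2 : String) : Bool :=
  let matchCount := CompAnagramLoop str1.toList str2.toList 0
  if matchCount = (str1.toList.length : Int) then true else false

-- ===== PORT B =====
def CompAnagram_alt (str1 : String) (str2 : String) : Bool :=
  PySem.Set.issubset (PySem.Set.ofList str1.toList) (PySem.Set.ofList str2.toList)

-- ===== PRECONDITION & SPEC =====
def Spec_CompAnagram (str1 : String) (str2 : String) (out : Bool) : Prop := out = CompAnagram_alt str1 str2
instance (str1 : String) (str2 : String) (out : Bool) : Decidable (Spec_CompAnagram str1 str2 out) := by unfold Spec_CompAnagram; infer_instance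

-- ===== CLAIM =====
def Claim_equal_CompAnagram : Prop := ∀ (str1 : String) (str2 : String), Dom_CompAnagram str1 str2 → Spec_CompAnagram str1 str2 (CompAnagram str1 str2)

-- ===== LEMMAS AND PROOFS =====

theorem inner_eq (i : Char) (js : List Char) :
    CompAnagramInner i js = if i ∈ js then 1 else 0 := by
  induction js with
  | nil => simp [CompAnagramInner]
  | cons j rest ih =>
    by_cases h : i = j <;> simp [CompAnagramInner, h, ih]

theorem loop_eq (cs js : List Char) (n : Int) :
    CompAnagramLoop cs js n = n + ((cs.filter (fun c => decide (c ∈ js))).length : Int) := by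
  induction cs generalizing n with
  | nil => simp [CompAnagramLoop]
  | cons c rest ih =>
    by_cases h : c ∈ js <;>
      simp [CompAnagramLoop, ih, inner_eq, h, List.filter] <;> ring

theorem filter_len (cs js : List Char) :
    ((cs.filter (fun c => decide (c ∈ js))).length = cs.length) ↔ ∀ c ∈ cs, c ∈ js := by
  induction cs with
  | nil => simp
  | cons c rest ih =>
    by_cases h : c ∈ js
    · simpa [List.filter, h] using ih
    · simp only [List.filter, h, decide_false]
      constructor
      · intro hlen
        exfalso
        have := List.length_filter_le (fun c => decide (c ∈ js)) rest
        simp [List.length_cons] at hlen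
        omega
      · intro hall
        exact absurd (hall c (by simp)) h

theorem A_iff (str1 str2 : String) :
    CompAnagram str1 str2 = true ↔ ∀ c ∈ str1.toList, c ∈ str2.toList := by
  unfold CompAnagram
  simp only [loop_eq, zero_add]
  rw [← filter_len str1.toList str2.toList]
  constructor
  · intro h
    split_ifs at h with hc
    · exact_mod_cast hc
  · intro h
    simp [h]

theorem B_iff (str1 str2 : String) :
    CompAnagram_alt str1 str2 = true ↔ ∀ c ∈ str1.toList, c ∈ str2.toList := by
  unfold CompAnagram_alt
  rw [PySem.Set.issubset_iff]
  simp [PySem.Set.mem_ofList]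

-- ===== VERDICT =====
theorem CompAnagram_spec : Claim_equal_CompAnagram := by
  intro str1 str2 _
  unfold Spec_CompAnagram
  by_cases h : ∀ c ∈ str1.toList, c ∈ str2.toList
  · rw [(A_iff str1 str2).mpr h, ((B_iff str1 str2).mpr h)]
  · have ha := (A_iff str1 str2).not.mpr h
    have hb := (B_iff str1 str2).not.mpr h
    simp only [Bool.not_eq_true] at ha hb
    rw [ha, hb]
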